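-- pv_equiv track=rewrite | github.com/YushaArif99/DCF_experiments | control_flow_experimental/ivy_fx/tests/test_while_loops.py | while_with_continue
-- ===== SOURCE A (Python) =====
-- def while_with_continue(n):
--     i = 0
--     sum = 0
--     while i < n:
--         i += 1
--         if i == n // 2:
--             continue
--         sum += i
--     return sum
-- ===== SOURCE B (Python) =====
-- def while_with_continue(n):
--     # Closed form: triangular sum 1..n, minus n//2 when that value lies in 1..n (i.e. n >= 2).
--     if n <= 0:
--         return 0
--     total = n * (n + 1) // 2
--     if n >= 2:
--         total -= n // 2
--     return total
-- ===== Notes on version B (the rewrite author's own statement) =====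
-- stated objective: faster
-- what changed: Replaced the O(n) while-loop accumulation with the closed-form triangular number n*(n+1)//2 minus n//2 when n>=2.
import Mathlib
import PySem

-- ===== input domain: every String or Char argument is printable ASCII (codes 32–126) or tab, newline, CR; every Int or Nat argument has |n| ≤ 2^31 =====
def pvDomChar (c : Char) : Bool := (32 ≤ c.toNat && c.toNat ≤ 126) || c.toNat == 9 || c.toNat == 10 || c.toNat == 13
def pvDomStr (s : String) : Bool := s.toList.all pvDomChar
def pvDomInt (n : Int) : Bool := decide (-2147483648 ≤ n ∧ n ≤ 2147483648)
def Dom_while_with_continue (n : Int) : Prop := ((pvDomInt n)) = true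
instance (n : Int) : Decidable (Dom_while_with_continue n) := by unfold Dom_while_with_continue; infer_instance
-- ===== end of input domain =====

-- B replaces A's O(n) skip-one-value summation loop with the closed-form triangular number (objective: faster, measured).

-- ===== PORT A =====
-- the while loop of A, state (i, sum); terminates because n - i shrinks
def whileLoopA (n i sum : Int) : Int :=
  if _h : i < n then
    if i + 1 = PySem.Int.floordiv n 2 then whileLoopA n (i + 1) sum
    else whileLoopA n (i + 1) (sum + (i + 1))
  else sum
termination_by (n - i).toNat
decreasing_by all_goals omega

def while_with_continue (n : Int) : Int := whileLoopA n 0 0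

-- ===== PORT B =====
def while_with_continue_alt (n : Int) : Int :=
  if n ≤ 0 then 0
  else
    let total := PySem.Int.floordiv (n * (n + 1)) 2
    if 2 ≤ n then total - PySem.Int.floordiv n 2 else total

-- ===== PRECONDITION & SPEC =====
def Spec_while_with_continue (n : Int) (out : Int) : Prop := out = while_with_continue_alt n
instance (n : Int) (out : Int) : Decidable (Spec_while_with_continue n out) := by unfold Spec_while_with_continue; infer_instance

-- ===== CLAIM (what is proved, stated in full; the proofs are below) =====
def Claim_equal_while_with_continue : Prop := ∀ (n : Int), Dom_while_with_continue n → Spec_while_with_continue n (while_with_continue n)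

-- ===== LEMMAS AND PROOFS =====

-- loop invariant: doubled to avoid division; half = n / 2 (floor, positive divisor)
theorem whileLoopA_closed (fuel : Nat) (n i sum : Int)
    (hf : (n - i).toNat = fuel) (h0 : 0 ≤ i) (hin : i ≤ n) :
    2 * whileLoopA n i sum =
      2 * sum + n * (n + 1) - i * (i + 1) -
        (if i < PySem.Int.floordiv n 2 then 2 * PySem.Int.floordiv n 2 else 0) := by
  induction fuel generalizing i sum with
  | zero =>
    have hin' : i = n := by omega
    subst hin'
    rw [whileLoopA]
    have hhalf : PySem.Int.floordiv i 2 = i / 2 := PySem.Int.floordiv_eq_ediv_of_pos (by omega)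
    rw [hhalf]
    have hni : ¬ (i < i / 2) := by omega
    simp [hni]
  | succ k ih =>
    have hlt : i < n := by omega
    rw [whileLoopA]
    simp only [hlt, dif_pos]
    have hhalf : PySem.Int.floordiv n 2 = n / 2 := PySem.Int.floordiv_eq_ediv_of_pos (by omega)
    rw [hhalf]
    by_cases hc : i + 1 = n / 2
    · rw [if_pos hc, ih (i + 1) sum (by omega) (by omega) (by omega), hhalf]
      have h1 : ¬ (i + 1 < n / 2) := by omega
      have h2 : i < n / 2 := by omega
      rw [if_neg h1, if_pos h2, ← hc]
      ring
    · rw [if_neg hc, ih (i + 1) (sum + (i + 1)) (by omega) (by omega) (by omega), hhalf]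
      have hiff : (i + 1 < n / 2) ↔ (i < n / 2) := by omega
      by_cases h2 : i < n / 2
      · rw [if_pos (hiff.mpr h2), if_pos h2]; ring
      · rw [if_neg (fun h => h2 (hiff.mp h)), if_neg h2]; ring

-- ===== VERDICT (by name: the statement is the Claim_ definition above) =====
theorem while_with_continue_spec : Claim_equal_while_with_continue := by
  intro n _
  unfold Spec_while_with_continue while_with_continue while_with_continue_alt
  by_cases hneg : n ≤ 0
  · rw [whileLoopA]
    simp [hneg]
  · have hpos : 0 < n := by omega
    have h := whileLoopA_closed (n - 0).toNat n 0 0 rfl (by omega) (by omega)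
    have hhalf : PySem.Int.floordiv n 2 = n / 2 := PySem.Int.floordiv_eq_ediv_of_pos (by omega)
    have htot : PySem.Int.floordiv (n * (n + 1)) 2 = n * (n + 1) / 2 :=
      PySem.Int.floordiv_eq_ediv_of_pos (by omega)
    rw [hhalf] at h
    rw [if_neg hneg, htot, hhalf]
    have heven : 2 * (n * (n + 1) / 2) = n * (n + 1) := by
      have : (2 : Int) ∣ n * (n + 1) := (Int.even_mul_succ_self n).two_dvd
      omega
    by_cases h2 : 2 ≤ n
    · have hlt : (0 : Int) < n / 2 := by omega
      rw [if_pos hlt] at h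
      rw [if_pos h2]
      omega
    · have hn1 : n = 1 := by omega
      subst hn1
      rw [if_neg h2]
      norm_num at h ⊢
      omega
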